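-- pv_equiv track=rewrite | github.com/paulluis-roehl/advent_of_code | day_06.py | toNumbers
-- ===== SOURCE A (Python) =====
-- from functools import reduce
--
-- def toInt(i):
--     if i == ' ':
--         return 0
--     elif i == '':
--         return 0
--     return int(i)
--
-- def toNumbers(lines):
--     nums = []
--     row = []
--     for i in range(len(lines[0])):
--         digits = [lines[0][i], lines[1][i], lines[2][i], lines[3][i]]
--         num = toInt(reduce(lambda s,c : s + c, digits, '').strip())
--         if num == 0:
--             nums.append(row)
--             row = []
--         else:
--             row.append(num)
--     return nums
-- ===== SOURCE B (Python) =====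
-- def toNumbers(lines):
--     top = lines[0]
--     vals = []
--     for i in range(len(top)):
--         col = (top[i] + lines[1][i] + lines[2][i] + lines[3][i]).strip()
--         vals.append(int(col) if col else 0)
--     zeros = [i for i, v in enumerate(vals) if v == 0]
--     return [vals[p + 1:z] for p, z in zip([-1] + zeros, zeros)]
-- ===== Notes on version B (the rewrite author's own statement) =====
-- stated objective: alternative
-- what changed: B drops A's running-row accumulator entirely: it parses the columns into a flat value list, computes the index positions of the zero separator columns, and cuts each group out by slicing the value list between consecutive zero positions (zip of shifted position lists), instead of A's single stateful loop that appends to and flushes a mutable row.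
import Mathlib
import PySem

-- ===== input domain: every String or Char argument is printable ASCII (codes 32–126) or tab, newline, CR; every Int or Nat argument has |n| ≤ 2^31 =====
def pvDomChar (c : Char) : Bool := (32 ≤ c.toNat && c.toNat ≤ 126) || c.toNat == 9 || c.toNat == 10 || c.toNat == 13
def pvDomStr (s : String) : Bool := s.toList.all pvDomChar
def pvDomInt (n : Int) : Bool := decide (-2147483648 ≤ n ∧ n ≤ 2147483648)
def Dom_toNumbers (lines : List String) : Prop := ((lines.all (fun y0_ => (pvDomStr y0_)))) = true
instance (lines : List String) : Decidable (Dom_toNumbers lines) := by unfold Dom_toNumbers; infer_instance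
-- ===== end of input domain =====

-- B replaces A's running-accumulator grouping by an index computation: it records the positions of the
-- zero (separator) columns and cuts each group out by slicing between consecutive zero positions
-- ("alternative"); equal return value to A on Pre_.

-- ===== PORT A =====

-- lines[j][i]; the `.getD ' '` default is unreachable under Pre_toNumbers (Python raises IndexError there)
def pvCharAt (lines : List String) (j : Nat) (i : Nat) : Char :=
  ((PySem.List.pyGet? lines (j : Int)).bind (fun s => PySem.Str.pyGet? s (i : Int))).getD ' '

-- A's toInt on the (already stripped) column characters; `.getD 0` is unreachable under
-- Pre_toNumbers (Python's int() raises ValueError there)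
def pvToInt (s : List Char) : Int :=
  if s = [' '] then 0
  else if s = [] then 0
  else (PySem.Int.ofChars? s).getD 0

def toNumbers (lines : List String) : List (List Int) :=
  -- reduce(lambda s,c: s+c, digits, '') is exactly the 4-character string of the column
  let n := ((PySem.List.pyGet? lines 0).getD "").toList.length
  let st := (List.range n).foldl
    (fun (st : List (List Int) × List Int) i =>
      let digits := [pvCharAt lines 0 i, pvCharAt lines 1 i, pvCharAt lines 2 i, pvCharAt lines 3 i]
      let num := pvToInt (PySem.Chars.strip digits)
      if num = 0 then (st.1 ++ [st.2], []) else (st.1, st.2 ++ [num]))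
    ([], [])
  st.1

-- ===== PORT B =====

-- B's inline parse: int(col) if col else 0  (`.getD 0` unreachable under Pre_toNumbers)
def pvParse (s : List Char) : Int :=
  if s ≠ [] then (PySem.Int.ofChars? s).getD 0 else 0

def toNumbers_alt (lines : List String) : List (List Int) :=
  let top := ((PySem.List.pyGet? lines 0).getD "").toList
  let vals := (List.range top.length).map (fun i =>
    pvParse (PySem.Chars.strip
      [pvCharAt lines 0 i, pvCharAt lines 1 i, pvCharAt lines 2 i, pvCharAt lines 3 i]))
  let zeros := ((PySem.List.enumerate vals).filter (fun p => p.2 = 0)).map Prod.fst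
  (List.zip ((-1 : Int) :: zeros) zeros).map
    (fun pz => PySem.List.slice vals (some (pz.1 + 1)) (some pz.2))

-- ===== PRECONDITION & SPEC =====

-- the column lines[0][i]++lines[1][i]++lines[2][i]++lines[3][i], none on IndexError (own copy, not the ports' helper)
def pvColumn? (lines : List String) (i : Nat) : Option (List Char) := do
  let c0 ← (PySem.List.pyGet? lines 0).bind (fun s => PySem.Str.pyGet? s (i : Int))
  let c1 ← (PySem.List.pyGet? lines 1).bind (fun s => PySem.Str.pyGet? s (i : Int))
  let c2 ← (PySem.List.pyGet? lines 2).bind (fun s => PySem.Str.pyGet? s (i : Int))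
  let c3 ← (PySem.List.pyGet? lines 3).bind (fun s => PySem.Str.pyGet? s (i : Int))
  pure [c0, c1, c2, c3]

-- exactly the inputs on which Python's A returns: lines[0] exists, every visited column index is in
-- range in lines[0..3] (else IndexError), and each stripped column is empty or an int literal (else ValueError)
def pvColOk (lines : List String) (i : Nat) : Bool :=
  match pvColumn? lines i with
  | none => false
  | some cs => PySem.Chars.strip cs = [] || (PySem.Int.ofChars? (PySem.Chars.strip cs)).isSome

def Pre_toNumbers (lines : List String) : Prop :=
  lines ≠ [] ∧
  ∀ i < ((PySem.List.pyGet? lines 0).getD "").toList.length, pvColOk lines i = true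
instance (lines : List String) : Decidable (Pre_toNumbers lines) := by unfold Pre_toNumbers; infer_instance

def pvWitness_toNumbers : List String := ["1 ", "2 ", "3 ", "4 "]

def Spec_toNumbers (lines : List String) (out : List (List Int)) : Prop := out = toNumbers_alt lines
instance (lines : List String) (out : List (List Int)) : Decidable (Spec_toNumbers lines out) := by unfold Spec_toNumbers; infer_instance

-- ===== CLAIM (what is proved, stated in full; the proofs are below) =====
def Claim_equal_toNumbers : Prop := ∀ (lines : List String), Dom_toNumbers lines → Pre_toNumbers lines → Spec_toNumbers lines (toNumbers lines)

-- ===== LEMMAS AND PROOFS =====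

-- reference splitter both ports are reduced to: A's accumulator loop computes it directly (pvFoldA),
-- B's slice-between-zero-positions computation equals it by induction (pvSlices_eq_groups)
def pvGroups (row : List Int) (vs : List Int) : List (List Int) :=
  match vs with
  | [] => []
  | v :: vs => if v = 0 then row :: pvGroups [] vs else pvGroups (row ++ [v]) vs

-- A's toInt and B's inline parse agree on every stripped column (int(' ') would be ValueError, but
-- PySem.Int.ofChars? [' '] = none, so both sides give 0 there)
theorem pvToInt_eq_pvParse (s : List Char) : pvToInt s = pvParse s := by
  unfold pvToInt pvParse
  by_cases h : s = [' ']
  · subst h; decide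
  · by_cases h2 : s = [] <;> simp [h, h2]

theorem pvFoldA (vs : List Int) (acc : List (List Int)) (row : List Int) :
    (vs.foldl (fun (st : List (List Int) × List Int) v =>
        if v = 0 then (st.1 ++ [st.2], []) else (st.1, st.2 ++ [v])) (acc, row)).1
      = acc ++ pvGroups row vs := by
  induction vs generalizing acc row with
  | nil => simp [pvGroups]
  | cons v vs ih =>
      by_cases h : v = 0 <;> simp [pvGroups, h, ih]

-- prepending a partial row only changes the first emitted group
theorem pvGroups_row (vs : List Int) (row : List Int) :
    pvGroups row vs = match pvGroups [] vs with
      | [] => []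
      | g :: gs => (row ++ g) :: gs := by
  induction vs generalizing row with
  | nil => simp [pvGroups]
  | cons v vs ih =>
      by_cases h : v = 0
      · simp [pvGroups, h]
      · rw [show pvGroups row (v :: vs) = pvGroups (row ++ [v]) vs by simp [pvGroups, h],
            show pvGroups [] (v :: vs) = pvGroups [v] vs by simp [pvGroups, h],
            ih (row ++ [v]), ih [v]]
        cases pvGroups [] vs with
        | nil => rfl
        | cons g gs => simp

-- zeros positions / slices, as the port computes them (proof-side abbreviations of B's body)
def pvZeros (vs : List Int) : List Int :=
  ((PySem.List.enumerate vs).filter (fun p => p.2 = 0)).map Prod.fst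

def pvSlices (vs : List Int) : List (List Int) :=
  (List.zip ((-1 : Int) :: pvZeros vs) (pvZeros vs)).map
    (fun pz => PySem.List.slice vs (some (pz.1 + 1)) (some pz.2))

theorem pvEnumerate_shift (vs : List Int) (s : Int) :
    PySem.List.enumerate vs (s + 1) = (PySem.List.enumerate vs s).map (fun p => (p.1 + 1, p.2)) := by
  induction vs generalizing s with
  | nil => simp [PySem.List.enumerate_nil]
  | cons v vs ih => simp [PySem.List.enumerate_cons, ih]

theorem pvZeros_cons (v : Int) (vs : List Int) :
    pvZeros (v :: vs) = (if v = 0 then [(0 : Int)] else []) ++ (pvZeros vs).map (· + 1) := by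
  unfold pvZeros
  rw [PySem.List.enumerate_cons, show (0 : Int) + 1 = 0 + 1 from rfl, pvEnumerate_shift vs 0]
  rw [List.filter_cons, List.filter_map, List.map_map]
  by_cases h : v = 0 <;> simp [h, Function.comp_def]

theorem pvZeros_nonneg (vs : List Int) : ∀ z ∈ pvZeros vs, 0 ≤ z := by
  induction vs with
  | nil => intro z hz; simp [pvZeros, PySem.List.enumerate_nil] at hz
  | cons v vs ih =>
      intro z hz
      rw [pvZeros_cons] at hz
      rcases List.mem_append.mp hz with h | h
      · split at h <;> simp at h; omega
      · obtain ⟨w, hw, rfl⟩ := List.mem_map.mp h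
        have := ih w hw; omega

theorem pvSlice_shift (x : Int) (xs : List Int) (a b : Int) (ha : 0 ≤ a) (hb : 0 ≤ b) :
    PySem.List.slice (x :: xs) (some (a + 1)) (some (b + 1))
      = PySem.List.slice xs (some a) (some b) := by
  rw [PySem.List.slice_toNat _ (by omega) (by omega),
      PySem.List.slice_toNat _ ha hb]
  have h1 : (a + 1).toNat = a.toNat + 1 := by omega
  have h2 : (b + 1).toNat = b.toNat + 1 := by omega
  simp [h1, h2, Nat.succ_sub_succ]

theorem pvSlice_cons_zero (x : Int) (xs : List Int) (b : Int) (hb : 0 ≤ b) :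
    PySem.List.slice (x :: xs) (some 0) (some (b + 1))
      = x :: PySem.List.slice xs (some 0) (some b) := by
  rw [PySem.List.slice_toNat _ (by omega) (by omega),
      PySem.List.slice_toNat _ le_rfl hb]
  have h2 : (b + 1).toNat = b.toNat + 1 := by omega
  simp [h2]

-- the one shifting step: slices of (x :: vs) taken between shifted positions are slices of vs
theorem pvSlices_shift_map (x : Int) (vs : List Int) (l1 l2 : List Int)
    (h1 : ∀ p ∈ l1, -1 ≤ p) (h2 : ∀ q ∈ l2, 0 ≤ q) :
    (List.zip (l1.map (· + 1)) (l2.map (· + 1))).map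
        (fun pz => PySem.List.slice (x :: vs) (some (pz.1 + 1)) (some pz.2))
      = (List.zip l1 l2).map (fun pz => PySem.List.slice vs (some (pz.1 + 1)) (some pz.2)) := by
  rw [List.zip_map, List.map_map]
  apply List.map_congr_left
  intro pz hpz
  obtain ⟨a, b⟩ := pz
  have hm := List.of_mem_zip hpz
  simp only [Function.comp_apply, Prod.map_apply]
  exact pvSlice_shift x vs (a + 1) b (by have := h1 a hm.1; omega) (h2 b hm.2)

theorem pvSlices_eq_groups (vs : List Int) : pvSlices vs = pvGroups [] vs := by
  induction vs with
  | nil => simp [pvSlices, pvZeros, PySem.List.enumerate_nil, pvGroups]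
  | cons v vs ih =>
      have hZ := pvZeros_nonneg vs
      by_cases h : v = 0
      · unfold pvSlices
        rw [pvZeros_cons, if_pos h, List.singleton_append, List.zip_cons_cons, List.map_cons]
        rw [show (0 : Int) :: (pvZeros vs).map (· + 1) = ((-1 : Int) :: pvZeros vs).map (· + 1)
              by simp]
        rw [pvSlices_shift_map v vs ((-1 : Int) :: pvZeros vs) (pvZeros vs)
              (by intro p hp
                  rcases List.mem_cons.mp hp with rfl | hp
                  · omega
                  · have := hZ p hp; omega)
              hZ]
        rw [show PySem.List.slice (v :: vs) (some ((-1 : Int) + 1)) (some 0) = ([] : List Int)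
              by rw [show ((-1 : Int) + 1) = 0 by ring, PySem.List.slice_toNat _ le_rfl le_rfl]
                 simp]
        rw [show pvGroups [] (v :: vs) = [] :: pvGroups [] vs by simp [pvGroups, h]]
        rw [← ih]
        rfl
      · unfold pvSlices
        rw [pvZeros_cons, if_neg h, List.nil_append]
        rcases hzv : pvZeros vs with _ | ⟨z0, rest⟩
        · have hnil : pvGroups [] vs = [] := by
            have := ih
            unfold pvSlices at this
            rw [hzv] at this
            simpa using this.symm
          simp [show pvGroups [] (v :: vs) = pvGroups ([] ++ [v]) vs by simp [pvGroups, h],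
                pvGroups_row vs [v], hnil]
        · have hz0 : 0 ≤ z0 := hZ z0 (by rw [hzv]; exact List.mem_cons_self ..)
          have hrest : ∀ q ∈ rest, 0 ≤ q := by
            intro q hq; exact hZ q (by rw [hzv]; exact List.mem_cons_of_mem _ hq)
          have ih' : PySem.List.slice vs (some 0) (some z0)
                :: (List.zip (z0 :: rest) rest).map
                    (fun pz => PySem.List.slice vs (some (pz.1 + 1)) (some pz.2))
              = pvGroups [] vs := by
            have := ih
            unfold pvSlices at this
            rw [hzv, List.zip_cons_cons, List.map_cons] at this
            simpa using this
          rw [List.map_cons, List.zip_cons_cons, List.map_cons]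
          rw [show ((-1 : Int) + 1) = 0 by ring]
          rw [pvSlice_cons_zero v vs z0 hz0]
          rw [show (z0 + 1) :: rest.map (· + 1) = (z0 :: rest).map (· + 1) by simp]
          rw [pvSlices_shift_map v vs (z0 :: rest) rest
                (by intro p hp; rcases List.mem_cons.mp hp with rfl | hp
                    · omega
                    · have := hrest p hp; omega)
                hrest]
          rw [show pvGroups [] (v :: vs) = pvGroups [v] vs by simp [pvGroups, h],
              pvGroups_row vs [v], ← ih']
          simp

-- A's loop, rewritten as the splitter over the list of per-column values
theorem pvA_eq (lines : List String) :
    toNumbers lines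
      = pvGroups []
          ((List.range (((PySem.List.pyGet? lines 0).getD "").toList.length)).map
            (fun i => pvToInt (PySem.Chars.strip
              [pvCharAt lines 0 i, pvCharAt lines 1 i, pvCharAt lines 2 i, pvCharAt lines 3 i]))) := by
  unfold toNumbers
  dsimp only
  rw [← List.nil_append (pvGroups [] _), ← pvFoldA, List.foldl_map]

-- ===== VERDICT (by name: the statement is the Claim_ definition above) =====
theorem toNumbers_spec : Claim_equal_toNumbers := by
  intro lines _ _
  unfold Spec_toNumbers
  rw [pvA_eq]
  rw [show toNumbers_alt lines
        = pvSlices ((List.range (((PySem.List.pyGet? lines 0).getD "").toList.length)).map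
            (fun i => pvParse (PySem.Chars.strip
              [pvCharAt lines 0 i, pvCharAt lines 1 i, pvCharAt lines 2 i, pvCharAt lines 3 i])))
      from rfl]
  rw [pvSlices_eq_groups]
  congr 1
  apply List.map_congr_left
  intro i _
  rw [pvToInt_eq_pvParse]
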